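-- pv_equiv track=rewrite | github.com/sak007/Jobby-Test | code/Scraper/main.py | generate_job_board_role_mp
-- ===== SOURCE A (Python) =====
-- def generate_job_board_role_mp(user_job_board_list, user_info):
--     job_board_role_mp = {}
--     for uj in user_job_board_list:
--         if uj[1] not in job_board_role_mp:
--             job_board_role_mp[uj[1]] = []
--         u_info = user_info[uj[0]]
--         job_board_role_mp[uj[1]].append((u_info[0], u_info[1]))
--     return job_board_role_mp
-- ===== SOURCE B (Python) =====
-- def generate_job_board_role_mp(user_job_board_list, user_info):
--     # Two-phase grouping: collect the boards in first-occurrence order,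
--     # then build each board's list with a single comprehension scan.
--     boards = dict.fromkeys(board for _, board in user_job_board_list)
--     return {
--         board: [(user_info[uid][0], user_info[uid][1])
--                 for uid, b in user_job_board_list if b == board]
--         for board in boards
--     }
-- ===== Notes on version B (the rewrite author's own statement) =====
-- stated objective: alternative
-- what changed: Replaces A's single-pass dict-of-lists accumulation (setdefault-style insert + append per element) by a two-phase grouping: dedup the board keys in first-occurrence order, then build each board's list with one filtering comprehension per board.
import Mathlib
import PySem

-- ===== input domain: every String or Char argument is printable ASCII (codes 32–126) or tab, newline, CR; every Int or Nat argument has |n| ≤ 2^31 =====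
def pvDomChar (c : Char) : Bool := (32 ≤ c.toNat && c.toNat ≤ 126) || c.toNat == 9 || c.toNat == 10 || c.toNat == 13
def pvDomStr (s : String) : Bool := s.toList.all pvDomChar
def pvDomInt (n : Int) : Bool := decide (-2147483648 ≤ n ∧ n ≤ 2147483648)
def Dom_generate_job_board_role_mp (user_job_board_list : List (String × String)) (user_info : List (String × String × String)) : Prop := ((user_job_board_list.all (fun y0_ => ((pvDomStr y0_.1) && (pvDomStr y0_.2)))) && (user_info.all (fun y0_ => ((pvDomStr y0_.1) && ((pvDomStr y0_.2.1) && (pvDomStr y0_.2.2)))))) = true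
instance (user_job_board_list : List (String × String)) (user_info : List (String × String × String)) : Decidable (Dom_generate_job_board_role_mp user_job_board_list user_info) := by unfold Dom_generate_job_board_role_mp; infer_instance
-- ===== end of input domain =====

-- B groups by a different decomposition (dedup the board keys first, then one filtering
-- scan per board) instead of A's single-pass dict accumulation; objective: alternative.

-- ===== PORT A =====
-- user_info is a Python dict str -> (str, str); lookup = first match. Under Pre_ the key is
-- always present, so the total getD form is exact there (Python raises KeyError otherwise).
def gjbA_lookup (user_info : List (String × String × String)) (uid : String) : String × String :=
  (PySem.Dict.mk user_info).getD uid ("", "")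

def gjbA_step (user_info : List (String × String × String))
    (d : PySem.Dict String (List (String × String))) (uj : String × String) :
    PySem.Dict String (List (String × String)) :=
  -- if uj[1] not in job_board_role_mp: job_board_role_mp[uj[1]] = []
  let d1 := if d.contains uj.2 then d else d.insert uj.2 []
  -- u_info = user_info[uj[0]]; job_board_role_mp[uj[1]].append((u_info[0], u_info[1]))
  let u := gjbA_lookup user_info uj.1
  d1.modify uj.2 [] (fun xs => xs ++ [(u.1, u.2)])

def generate_job_board_role_mp (user_job_board_list : List (String × String)) (user_info : List (String × String × String)) : List (String × List (String × String)) :=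
  (user_job_board_list.foldl (gjbA_step user_info) PySem.Dict.empty).items

-- ===== PORT B =====
def gjbB_lookup (user_info : List (String × String × String)) (uid : String) : String × String :=
  (PySem.Dict.mk user_info).getD uid ("", "")

def generate_job_board_role_mp_alt (user_job_board_list : List (String × String)) (user_info : List (String × String × String)) : List (String × List (String × String)) :=
  -- boards = dict.fromkeys(board for _, board in user_job_board_list)
  let boards : PySem.Set String := PySem.Set.ofList (user_job_board_list.map (fun uj => uj.2))
  -- {board: [(user_info[uid][0], user_info[uid][1]) for uid, b in ujbl if b == board] for board in boards}
  boards.map (fun board =>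
    (board,
      (user_job_board_list.filter (fun uj => uj.2 == board)).map (fun uj =>
        let u := gjbB_lookup user_info uj.1
        (u.1, u.2))))

-- ===== PRECONDITION & SPEC =====
-- Pre_ excludes exactly the inputs on which Python A raises KeyError: a user id in
-- user_job_board_list that is not a key of the user_info dict.
def Pre_generate_job_board_role_mp (user_job_board_list : List (String × String)) (user_info : List (String × String × String)) : Prop :=
  ∀ uj ∈ user_job_board_list, uj.1 ∈ user_info.map (fun p => p.1)
instance (user_job_board_list : List (String × String)) (user_info : List (String × String × String)) : Decidable (Pre_generate_job_board_role_mp user_job_board_list user_info) := by unfold Pre_generate_job_board_role_mp; infer_instance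

def pvWitness_generate_job_board_role_mp : (List (String × String)) × (List (String × String × String)) :=
  ([("u1", "linkedin"), ("u2", "indeed"), ("u1", "indeed")],
   [("u1", "Ann", "dev"), ("u2", "Bob", "qa")])

def Spec_generate_job_board_role_mp (user_job_board_list : List (String × String)) (user_info : List (String × String × String)) (out : List (String × List (String × String))) : Prop := out = generate_job_board_role_mp_alt user_job_board_list user_info
instance (user_job_board_list : List (String × String)) (user_info : List (String × String × String)) (out : List (String × List (String × String))) : Decidable (Spec_generate_job_board_role_mp user_job_board_list user_info out) := by unfold Spec_generate_job_board_role_mp; infer_instance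

-- ===== CLAIM (what is proved, stated in full; the proofs are below) =====
def Claim_equal_generate_job_board_role_mp : Prop := ∀ (user_job_board_list : List (String × String)) (user_info : List (String × String × String)), Dom_generate_job_board_role_mp user_job_board_list user_info → Pre_generate_job_board_role_mp user_job_board_list user_info → Spec_generate_job_board_role_mp user_job_board_list user_info (generate_job_board_role_mp user_job_board_list user_info)

-- ===== LEMMAS AND PROOFS =====

-- One step of A's loop leaves every getD-with-[] lookup appended at the stepped key.
theorem gjbA_step_getD (ui : List (String × String × String))
    (d : PySem.Dict String (List (String × String))) (uj : String × String) (b : String) :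
    (gjbA_step ui d uj).getD b [] =
      d.getD b [] ++ (if uj.2 == b then [((gjbA_lookup ui uj.1).1, (gjbA_lookup ui uj.1).2)] else []) := by
  unfold gjbA_step
  by_cases hc : d.contains uj.2
  · simp only [hc, if_true, PySem.Dict.getD_modify]
    by_cases hb : b = uj.2
    · simp [hb]
    · simp [hb, beq_iff_eq, Ne.symm hb]
  · simp only [hc]
    rw [if_neg (by simp [hc])]
    rw [PySem.Dict.getD_modify]
    by_cases hb : b = uj.2
    · subst hb
      simp [PySem.Dict.getD_insert, PySem.Dict.getD_of_not_contains d [] (by simpa using hc)]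
    · rw [if_neg hb, PySem.Dict.getD_insert]
      simp [hb, Ne.symm hb, beq_iff_eq]

-- The accumulated dict's lookups are the per-board filtered scans of the processed prefix.
theorem gjbA_foldl_getD (ui : List (String × String × String))
    (l : List (String × String)) (d : PySem.Dict String (List (String × String))) (b : String) :
    (l.foldl (gjbA_step ui) d).getD b [] =
      d.getD b [] ++ (l.filter (fun uj => uj.2 == b)).map (fun uj =>
        ((gjbA_lookup ui uj.1).1, (gjbA_lookup ui uj.1).2)) := by
  induction l generalizing d with
  | nil => simp
  | cons uj l ih =>
    simp only [List.foldl_cons, ih, List.filter_cons]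
    rw [gjbA_step_getD]
    by_cases h : uj.2 == b <;> simp [h]

-- One step of A's loop adds the stepped key to the key set.
theorem gjbA_step_keys (ui : List (String × String × String))
    (d : PySem.Dict String (List (String × String))) (uj : String × String) :
    (gjbA_step ui d uj).keys = PySem.Set.add d.keys uj.2 := by
  unfold gjbA_step PySem.Set.add
  by_cases hc : d.contains uj.2
  · have hm : uj.2 ∈ d.keys := (PySem.Dict.contains_iff_mem_keys d uj.2).mp hc
    simp only [hc, if_true, PySem.Dict.keys_modify]
    rw [PySem.Dict.keys_insert_of_contains _ _ hc]
    simp [PySem.Set.contains, hm]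
  · have hm : uj.2 ∉ d.keys := fun h => hc ((PySem.Dict.contains_iff_mem_keys d uj.2).mpr h)
    simp only [hc]
    rw [if_neg (by simp [hc]), PySem.Dict.keys_modify,
        PySem.Dict.keys_insert_of_contains _ _ (by simp), PySem.Dict.keys_insert_of_not_contains _ _ (Bool.not_eq_true _ ▸ eq_false_of_ne_true hc)]
    simp [PySem.Set.contains, hm]

theorem gjbA_foldl_keys (ui : List (String × String × String))
    (l : List (String × String)) (d : PySem.Dict String (List (String × String))) :
    (l.foldl (gjbA_step ui) d).keys = PySem.Set.update d.keys (l.map (fun uj => uj.2)) := by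
  induction l generalizing d with
  | nil => simp [PySem.Set.update]
  | cons uj l ih =>
    simp only [List.foldl_cons, ih, List.map_cons, PySem.Set.update_cons, gjbA_step_keys]

-- ===== VERDICT (by name: the statement is the Claim_ definition above) =====
theorem generate_job_board_role_mp_spec : Claim_equal_generate_job_board_role_mp := by
  intro l ui _ _
  unfold Spec_generate_job_board_role_mp generate_job_board_role_mp generate_job_board_role_mp_alt
  have hkeys : (l.foldl (gjbA_step ui) PySem.Dict.empty).keys
      = PySem.Set.ofList (l.map (fun uj => uj.2)) := by
    rw [gjbA_foldl_keys]
    simpa using PySem.Set.update_nil_left (l.map (fun uj => uj.2))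
  have hnd : (l.foldl (gjbA_step ui) PySem.Dict.empty).keys.Nodup := by
    rw [hkeys]; exact PySem.Set.nodup_ofList _
  rw [PySem.Dict.items_eq_map_keys _ hnd [], hkeys]
  refine List.map_congr_left (fun b _ => ?_)
  rw [gjbA_foldl_getD]
  simp [gjbA_lookup, gjbB_lookup]
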